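-- pv_equiv track=rewrite | github.com/ungvilde/Causal-discovery | functions.py | get_MAG_summary
-- ===== SOURCE A (Python) =====
-- def get_MAG_summary(mag, n_timelags):
--     summary_edges = {(u // (n_timelags+1), v // (n_timelags+1)) : None for u, v in mag if u // (n_timelags+1) != v // (n_timelags+1)}
--
--     for edge in mag:
--         u, v = edge
--         neuron1, neuron2 = u // (n_timelags+1), v // (n_timelags+1)
--
--         if neuron1 == neuron2:
--             # if u and v belong to the same neuron
--             continue
--
--         elif mag[edge] == '-->':
--             # when we have causal effect
--             summary_edges[(neuron1, neuron2)] = '-->'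
--
--         elif mag[edge] == '<->' and summary_edges[(neuron1, neuron2)] != '-->':
--             summary_edges[(neuron1, neuron2)] = '<->'
--
--     return summary_edges
-- ===== SOURCE B (Python) =====
-- def get_MAG_summary(mag, n_timelags):
--     # staged: list the cross pairs, compute the arrow/bidirected pair sets,
--     # then classify each pair once by set membership (no stateful updates)
--     d = n_timelags + 1
--     cross = [(u // d, v // d) for u, v in mag if u // d != v // d]
--     arrows = {(u // d, v // d) for (u, v), lbl in mag.items()
--               if lbl == '-->' and u // d != v // d}
--     bidirs = {(u // d, v // d) for (u, v), lbl in mag.items()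
--               if lbl == '<->' and u // d != v // d}
--     return {p: ('-->' if p in arrows else '<->' if p in bidirs else None)
--             for p in cross}
-- ===== Notes on version B (the rewrite author's own statement) =====
-- stated objective: alternative
-- what changed: A's stateful per-edge update loop over a pre-keyed dict is replaced by staged declarative passes: list the cross-neuron pairs, build the set of pairs with a '-->' edge and the set with a '<->' edge, then classify every pair once by set membership.
import Mathlib
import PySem

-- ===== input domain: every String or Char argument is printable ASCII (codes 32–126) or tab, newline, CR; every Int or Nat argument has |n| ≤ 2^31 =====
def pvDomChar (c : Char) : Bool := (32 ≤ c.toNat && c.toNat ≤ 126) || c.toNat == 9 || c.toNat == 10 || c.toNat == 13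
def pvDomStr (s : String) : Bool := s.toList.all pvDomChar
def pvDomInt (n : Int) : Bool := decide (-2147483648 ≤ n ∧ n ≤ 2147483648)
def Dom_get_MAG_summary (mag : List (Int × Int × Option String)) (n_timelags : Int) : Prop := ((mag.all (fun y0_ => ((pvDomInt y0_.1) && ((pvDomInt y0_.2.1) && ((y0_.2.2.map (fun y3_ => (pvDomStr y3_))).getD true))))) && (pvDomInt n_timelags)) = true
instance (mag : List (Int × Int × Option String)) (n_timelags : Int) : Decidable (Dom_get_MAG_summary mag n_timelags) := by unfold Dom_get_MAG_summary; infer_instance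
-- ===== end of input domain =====

-- B replaces A's stateful per-edge dict updates by staged passes: list the cross
-- pairs, build the set of '-->' pairs and the set of '<->' pairs, then classify
-- each pair once by set membership; objective: alternative (same asymptotic cost).

-- ===== PORT A =====
-- the neuron pair of a dict item (u // (n_timelags+1), v // (n_timelags+1))
def pvPairOf (t : Int) (it : (Int × Int) × Option String) : Int × Int :=
  (PySem.Int.floordiv it.1.1 (t + 1), PySem.Int.floordiv it.1.2 (t + 1))

-- body of A's dict comprehension
def pvStep0 (t : Int) (acc : PySem.Dict (Int × Int) (Option String)) (it : (Int × Int) × Option String) : PySem.Dict (Int × Int) (Option String) :=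
  if (pvPairOf t it).1 ≠ (pvPairOf t it).2 then acc.insert (pvPairOf t it) none else acc

-- body of A's for-loop (looks labels up in the dict, as 'mag[edge]' does)
def pvStepAraw (t : Int) (magD : PySem.Dict (Int × Int) (Option String)) (acc : PySem.Dict (Int × Int) (Option String)) (it : (Int × Int) × Option String) : PySem.Dict (Int × Int) (Option String) :=
  if (pvPairOf t it).1 = (pvPairOf t it).2 then acc
  else if magD.get? it.1 = some (some "-->") then acc.insert (pvPairOf t it) (some "-->")
  else if magD.get? it.1 = some (some "<->") ∧ acc.get? (pvPairOf t it) ≠ some (some "-->") then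
    acc.insert (pvPairOf t it) (some "<->")
  else acc

-- A's parameter 'mag' is a dict {(u,v): label}; per the type convention it arrives as the
-- association list of triples (u, v, label); 'PySem.Dict.ofList' rebuilds the dict
-- (insertion order, later duplicate keys overwrite in place) that Python A iterates.
def get_MAG_summary (mag : List (Int × Int × Option String)) (n_timelags : Int) : List (Int × Int × Option String) :=
  let magD : PySem.Dict (Int × Int) (Option String) :=
    PySem.Dict.ofList (mag.map (fun e => ((e.1, e.2.1), e.2.2)))
  -- {(u//(n+1), v//(n+1)) : None for u, v in mag if ...}
  let summary0 : PySem.Dict (Int × Int) (Option String) :=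
    magD.items.foldl (pvStep0 n_timelags) PySem.Dict.empty
  -- for edge in mag: ...
  let summary : PySem.Dict (Int × Int) (Option String) :=
    magD.items.foldl (pvStepAraw n_timelags magD) summary0
  summary.items.map (fun q => (q.1.1, q.1.2, q.2))

-- ===== PORT B =====
-- the comprehension filter 'u // d != v // d'
def pvCrossB (t : Int) (it : (Int × Int) × Option String) : Bool :=
  decide ((pvPairOf t it).1 ≠ (pvPairOf t it).2)

-- {(u // d, v // d) for (u, v), lbl in mag.items() if lbl == '-->' and u // d != v // d}
def pvArrowSet (t : Int) (l : List ((Int × Int) × Option String)) : PySem.Set (Int × Int) :=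
  PySem.Set.ofList ((l.filter (fun it => it.2 == some "-->" && pvCrossB t it)).map (pvPairOf t))

-- {(u // d, v // d) for (u, v), lbl in mag.items() if lbl == '<->' and u // d != v // d}
def pvBiSet (t : Int) (l : List ((Int × Int) × Option String)) : PySem.Set (Int × Int) :=
  PySem.Set.ofList ((l.filter (fun it => it.2 == some "<->" && pvCrossB t it)).map (pvPairOf t))

-- '-->' if p in arrows else '<->' if p in bidirs else None
def pvClassify (arrows bidirs : PySem.Set (Int × Int)) (p : Int × Int) : Option String :=
  if PySem.Set.contains arrows p then some "-->"
  else if PySem.Set.contains bidirs p then some "<->"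
  else none

def get_MAG_summary_alt (mag : List (Int × Int × Option String)) (n_timelags : Int) : List (Int × Int × Option String) :=
  let magD : PySem.Dict (Int × Int) (Option String) :=
    PySem.Dict.ofList (mag.map (fun e => ((e.1, e.2.1), e.2.2)))
  -- cross = [(u // d, v // d) for u, v in mag if u // d != v // d]
  let cross : List (Int × Int) := (magD.items.filter (pvCrossB n_timelags)).map (pvPairOf n_timelags)
  let arrows := pvArrowSet n_timelags magD.items
  let bidirs := pvBiSet n_timelags magD.items
  -- {p: ('-->' if p in arrows else '<->' if p in bidirs else None) for p in cross}
  let out : PySem.Dict (Int × Int) (Option String) :=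
    cross.foldl (fun acc p => acc.insert p (pvClassify arrows bidirs p)) PySem.Dict.empty
  out.items.map (fun q => (q.1.1, q.1.2, q.2))

-- ===== PRECONDITION & SPEC =====
-- Pre_ excludes only n_timelags = -1 with a nonempty mag, where Python A raises
-- ZeroDivisionError (u // (n_timelags+1) divides by zero).
def Pre_get_MAG_summary (mag : List (Int × Int × Option String)) (n_timelags : Int) : Prop :=
  mag = [] ∨ n_timelags ≠ -1
instance (mag : List (Int × Int × Option String)) (n_timelags : Int) : Decidable (Pre_get_MAG_summary mag n_timelags) := by unfold Pre_get_MAG_summary; infer_instance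

def pvWitness_get_MAG_summary : (List (Int × Int × Option String)) × Int :=
  ([(0, 2, some "-->"), (1, 3, some "<->"), (0, 1, some "-->"), (2, 0, some "o-o")], 1)

def Spec_get_MAG_summary (mag : List (Int × Int × Option String)) (n_timelags : Int) (out : List (Int × Int × Option String)) : Prop := out = get_MAG_summary_alt mag n_timelags
instance (mag : List (Int × Int × Option String)) (n_timelags : Int) (out : List (Int × Int × Option String)) : Decidable (Spec_get_MAG_summary mag n_timelags out) := by unfold Spec_get_MAG_summary; infer_instance

-- ===== CLAIM (what is proved, stated in full; the proofs are below) =====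
def Claim_equal_get_MAG_summary : Prop := ∀ (mag : List (Int × Int × Option String)) (n_timelags : Int), Dom_get_MAG_summary mag n_timelags → Pre_get_MAG_summary mag n_timelags → Spec_get_MAG_summary mag n_timelags (get_MAG_summary mag n_timelags)

-- ===== LEMMAS AND PROOFS =====

-- pvStepAraw with the lookup replaced by the item's own label (valid on the dict's items)
def pvStepA (t : Int) (acc : PySem.Dict (Int × Int) (Option String)) (it : (Int × Int) × Option String) : PySem.Dict (Int × Int) (Option String) :=
  if (pvPairOf t it).1 = (pvPairOf t it).2 then acc
  else if it.2 = some "-->" then acc.insert (pvPairOf t it) (some "-->")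
  else if it.2 = some "<->" ∧ acc.get? (pvPairOf t it) ≠ some (some "-->") then
    acc.insert (pvPairOf t it) (some "<->")
  else acc

-- does the (processed part of the) item list contain a cross '-->' edge for pair p?
def pvHasArrow (t : Int) (p : Int × Int) (l : List ((Int × Int) × Option String)) : Bool :=
  l.any (fun it => pvCrossB t it && it.2 == some "-->" && decide (pvPairOf t it = p))

def pvHasBi (t : Int) (p : Int × Int) (l : List ((Int × Int) × Option String)) : Bool :=
  l.any (fun it => pvCrossB t it && it.2 == some "<->" && decide (pvPairOf t it = p))

-- the label A's loop leaves at pair p after processing l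
def pvLab (t : Int) (p : Int × Int) (l : List ((Int × Int) × Option String)) : Option String :=
  if pvHasArrow t p l then some "-->" else if pvHasBi t p l then some "<->" else none

-- the fresh cross pairs of l in first-occurrence order, skipping those in ks
def pvFresh (t : Int) : List ((Int × Int) × Option String) → List (Int × Int) → List (Int × Int)
  | [], _ => []
  | it :: l, ks =>
    if (pvPairOf t it).1 ≠ (pvPairOf t it).2 ∧ pvPairOf t it ∉ ks then
      pvPairOf t it :: pvFresh t l (pvPairOf t it :: ks)
    else pvFresh t l ks

-- first occurrences of a pair list, skipping those in ks
def pvFreshP : List (Int × Int) → List (Int × Int) → List (Int × Int)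
  | [], _ => []
  | p :: ps, ks => if p ∉ ks then p :: pvFreshP ps (p :: ks) else pvFreshP ps ks

theorem pvFresh_congr (t : Int) (l : List ((Int × Int) × Option String)) (ks ks' : List (Int × Int))
    (h : ∀ x, x ∈ ks ↔ x ∈ ks') : pvFresh t l ks = pvFresh t l ks' := by
  induction l generalizing ks ks' with
  | nil => rfl
  | cons it l ih =>
    simp only [pvFresh, h]
    split
    · exact congrArg _ (ih _ _ (by intro x; simp [h]))
    · exact ih _ _ h

theorem pvFreshP_congr (ps : List (Int × Int)) (ks ks' : List (Int × Int))
    (h : ∀ x, x ∈ ks ↔ x ∈ ks') : pvFreshP ps ks = pvFreshP ps ks' := by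
  induction ps generalizing ks ks' with
  | nil => rfl
  | cons p ps ih =>
    simp only [pvFreshP, h]
    split
    · exact congrArg _ (ih _ _ (by intro x; simp [h]))
    · exact ih _ _ h

theorem pvFresh_nodup_notmem (t : Int) (l : List ((Int × Int) × Option String)) (ks : List (Int × Int)) :
    (pvFresh t l ks).Nodup ∧ ∀ k ∈ pvFresh t l ks, k ∉ ks := by
  induction l generalizing ks with
  | nil => simp [pvFresh]
  | cons it l ih =>
    simp only [pvFresh]
    split
    · rename_i hcond
      obtain ⟨hnd, hmem⟩ := ih (pvPairOf t it :: ks)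
      refine ⟨List.nodup_cons.mpr ⟨fun hk => (hmem _ hk) (by simp), hnd⟩, ?_⟩
      intro k hk
      rcases List.mem_cons.mp hk with rfl | hk
      · exact hcond.2
      · intro hks; exact (hmem _ hk) (List.mem_cons_of_mem _ hks)
    · obtain ⟨hnd, hmem⟩ := ih ks
      exact ⟨hnd, hmem⟩

-- every cross pair of l lands in ks or in the fresh list
theorem pvFresh_mem (t : Int) (l : List ((Int × Int) × Option String)) (ks : List (Int × Int)) :
    ∀ it ∈ l, (pvPairOf t it).1 ≠ (pvPairOf t it).2 →
      pvPairOf t it ∈ ks ∨ pvPairOf t it ∈ pvFresh t l ks := by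
  induction l generalizing ks with
  | nil => intro it h; cases h
  | cons it' l ih =>
    intro it hit hcross
    simp only [pvFresh]
    rcases List.mem_cons.mp hit with rfl | hit
    · by_cases hm : pvPairOf t it ∈ ks
      · exact Or.inl hm
      · rw [if_pos ⟨hcross, hm⟩]; right; exact List.mem_cons_self ..
    · split
      · rcases ih (pvPairOf t it' :: ks) it hit hcross with h | h
        · rcases List.mem_cons.mp h with h | h
          · right; rw [h]; exact List.mem_cons_self ..
          · exact Or.inl h
        · right; exact List.mem_cons_of_mem _ h
      · exact ih ks it hit hcross

-- the cross-pair projection of l dedups to pvFresh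
theorem pvFreshP_eq_pvFresh (t : Int) (l : List ((Int × Int) × Option String)) (ks : List (Int × Int)) :
    pvFreshP ((l.filter (pvCrossB t)).map (pvPairOf t)) ks = pvFresh t l ks := by
  induction l generalizing ks with
  | nil => rfl
  | cons it l ih =>
    by_cases hc : (pvPairOf t it).1 ≠ (pvPairOf t it).2
    · rw [show (it :: l).filter (pvCrossB t) = it :: l.filter (pvCrossB t) from
        List.filter_cons_of_pos (by simp [pvCrossB, hc])]
      simp only [List.map_cons, pvFreshP, pvFresh]
      by_cases hm : pvPairOf t it ∈ ks
      · rw [if_neg (by simp [hm]), if_neg (by simp [hm]), ih]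
      · rw [if_pos hm, if_pos ⟨hc, hm⟩, ih]
    · rw [show (it :: l).filter (pvCrossB t) = l.filter (pvCrossB t) from
        List.filter_cons_of_neg (by simp [pvCrossB, hc])]
      simp only [pvFresh]
      rw [if_neg (by simp only [not_and]; intro h; exact absurd h hc), ih]

-- splitting a nodup key list at a member
theorem pvSplitKeys (keys : List (Int × Int)) (k : Int × Int)
    (hnd : keys.Nodup) (hm : k ∈ keys) :
    ∃ ka kb, keys = ka ++ k :: kb ∧ k ∉ ka ∧ k ∉ kb := by
  obtain ⟨ka, kb, rfl⟩ := List.append_of_mem hm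
  rw [List.nodup_append] at hnd
  exact ⟨ka, kb, rfl, fun hka => hnd.2.2 k hka k (by simp) rfl,
    (List.nodup_cons.mp hnd.2.1).1⟩

-- overwriting a present key replaces its entry in place
theorem pvInsert_mid {V : Type} (d : PySem.Dict (Int × Int) V) (k : Int × Int) (w v : V)
    (xs ys : List ((Int × Int) × V)) (hitems : d.items = xs ++ (k, v) :: ys)
    (hxs : ∀ q ∈ xs, q.1 ≠ k) (hys : ∀ q ∈ ys, q.1 ≠ k) :
    (d.insert k w).items = xs ++ (k, w) :: ys := by
  have hc : d.contains k = true := by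
    rw [PySem.Dict.contains_eq_decide_mem_keys]
    simp [PySem.Dict.keys, hitems]
  rw [PySem.Dict.items_insert_of_contains _ _ hc, hitems]
  simp only [List.map_append, List.map_cons, beq_self_eq_true, if_pos]
  congr 1
  · rw [List.map_congr_left (fun q hq => if_neg (by simpa using hxs q hq)), List.map_id_fun', id]
  · congr 1
    rw [List.map_congr_left (fun q hq => if_neg (by simpa using hys q hq)), List.map_id_fun', id]

-- inserting an absent key appends its entry
theorem pvInsert_append {V : Type} (d : PySem.Dict (Int × Int) V) (k : Int × Int) (w : V)
    (hm : k ∉ d.keys) : (d.insert k w).items = d.items ++ [(k, w)] := by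
  have hc : d.contains k = false := by
    rw [PySem.Dict.contains_eq_decide_mem_keys]; simp [hm]
  exact PySem.Dict.items_insert_of_not_contains _ _ hc

-- A's first loop (the dict comprehension) appends the fresh cross pairs, value None
theorem pvInit_items (t : Int) (l : List ((Int × Int) × Option String))
    (acc : PySem.Dict (Int × Int) (Option String))
    (hnd : acc.keys.Nodup) (hnone : ∀ q ∈ acc.items, q.2 = none) :
    (l.foldl (pvStep0 t) acc).items
      = acc.items ++ (pvFresh t l acc.keys).map (fun k => (k, (none : Option String))) := by
  induction l generalizing acc with
  | nil => simp [pvFresh]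
  | cons it l ih =>
    simp only [List.foldl_cons, pvFresh, pvStep0]
    by_cases hcross : (pvPairOf t it).1 ≠ (pvPairOf t it).2
    · rw [if_pos hcross]
      by_cases hmem : pvPairOf t it ∈ acc.keys
      · rw [if_neg (by simp [hmem])]
        have hm' : pvPairOf t it ∈ acc.items.map Prod.fst := by simpa [PySem.Dict.keys] using hmem
        obtain ⟨q, hq, hq1⟩ := List.mem_map.mp hm'
        have hv : q.2 = none := hnone q hq
        obtain ⟨xs, ys, hsplit⟩ := List.append_of_mem hq
        have hndk := hnd
        rw [show acc.keys = acc.items.map Prod.fst from rfl, hsplit] at hndk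
        simp only [List.map_append, List.map_cons, List.nodup_append, List.nodup_cons] at hndk
        have hxs : ∀ r ∈ xs, r.1 ≠ pvPairOf t it := by
          intro r hr hcon
          exact hndk.2.2 _ (List.mem_map_of_mem hr) q.1 (by simp) (by simp [hq1, hcon])
        have hys : ∀ r ∈ ys, r.1 ≠ pvPairOf t it := by
          intro r hr hcon
          apply hndk.2.1.1
          have : r.1 ∈ List.map Prod.fst ys := List.mem_map_of_mem hr
          rwa [hcon, ← hq1] at this
        have hsp : acc.items = xs ++ (pvPairOf t it, (none : Option String)) :: ys := by
          rw [hsplit]; congr 1; simp [← hq1, ← hv]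
        have heq : acc.insert (pvPairOf t it) none = acc := by
          apply PySem.Dict.ext
          rw [pvInsert_mid acc _ none none xs ys hsp hxs hys, hsp]
        rw [heq, ih acc hnd hnone]
      · rw [if_pos ⟨hcross, hmem⟩]
        have hit : (acc.insert (pvPairOf t it) none).items = acc.items ++ [(pvPairOf t it, none)] :=
          pvInsert_append acc _ none hmem
        have hk : (acc.insert (pvPairOf t it) none).keys = acc.keys ++ [pvPairOf t it] := by
          simp [PySem.Dict.keys, hit]
        have hfr : pvFresh t l (acc.keys ++ [pvPairOf t it]) = pvFresh t l (pvPairOf t it :: acc.keys) :=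
          pvFresh_congr t l _ _ (fun x => by simp [or_comm])
        rw [ih (acc.insert (pvPairOf t it) none)
              (by rw [hk]
                  exact List.Nodup.append hnd (List.nodup_singleton _)
                    (by intro x hx hx'; simp at hx'; exact hmem (hx' ▸ hx)))
              (by intro q hq; rw [hit] at hq
                  rcases List.mem_append.mp hq with h | h
                  · exact hnone q h
                  · simp at h; simp [h]),
            hit, hk, hfr]
        simp
    · rw [if_neg hcross, if_neg (by simp only [not_and]; intro h; exact absurd h hcross)]
      exact ih acc hnd hnone

-- pvHasArrow / pvHasBi over a snoc
theorem pvHasArrow_snoc (t : Int) (it : (Int × Int) × Option String) (p : Int × Int)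
    (pr : List ((Int × Int) × Option String)) :
    pvHasArrow t p (pr ++ [it])
      = (pvHasArrow t p pr || (pvCrossB t it && it.2 == some "-->" && decide (pvPairOf t it = p))) := by
  simp [pvHasArrow, List.any_append]

theorem pvHasBi_snoc (t : Int) (it : (Int × Int) × Option String) (p : Int × Int)
    (pr : List ((Int × Int) × Option String)) :
    pvHasBi t p (pr ++ [it])
      = (pvHasBi t p pr || (pvCrossB t it && it.2 == some "<->" && decide (pvPairOf t it = p))) := by
  simp [pvHasBi, List.any_append]

-- appending an item whose pair is not p leaves pvLab at p unchanged
theorem pvLab_snoc_ne (t : Int) (it : (Int × Int) × Option String) (p : Int × Int)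
    (pr : List ((Int × Int) × Option String)) (h : pvPairOf t it ≠ p) :
    pvLab t p (pr ++ [it]) = pvLab t p pr := by
  rw [pvLab, pvLab, pvHasArrow_snoc, pvHasBi_snoc]
  simp [h]

-- appending a same-neuron item leaves pvLab unchanged
theorem pvLab_snoc_noncross (t : Int) (it : (Int × Int) × Option String) (p : Int × Int)
    (pr : List ((Int × Int) × Option String)) (hc : (pvPairOf t it).1 = (pvPairOf t it).2) :
    pvLab t p (pr ++ [it]) = pvLab t p pr := by
  rw [pvLab, pvLab, pvHasArrow_snoc, pvHasBi_snoc]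
  simp [pvCrossB, hc]

-- appending an item whose label is neither arrow leaves pvLab unchanged
theorem pvLab_snoc_other (t : Int) (it : (Int × Int) × Option String) (p : Int × Int)
    (pr : List ((Int × Int) × Option String)) (h2 : ¬ it.2 = some "-->") (h3 : ¬ it.2 = some "<->") :
    pvLab t p (pr ++ [it]) = pvLab t p pr := by
  rw [pvLab, pvLab, pvHasArrow_snoc, pvHasBi_snoc]
  simp [h2, h3]

-- main invariant for A's second loop
theorem pvA_items (t : Int) (l pr : List ((Int × Int) × Option String))
    (keys : List (Int × Int)) (acc : PySem.Dict (Int × Int) (Option String))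
    (hnd : keys.Nodup)
    (hacc : acc.items = keys.map (fun p => (p, pvLab t p pr)))
    (hk : ∀ it ∈ l, (pvPairOf t it).1 ≠ (pvPairOf t it).2 → pvPairOf t it ∈ keys) :
    (l.foldl (pvStepA t) acc).items = keys.map (fun p => (p, pvLab t p (pr ++ l))) := by
  induction l generalizing pr acc with
  | nil => simpa using hacc
  | cons it l ih =>
    have hkeysD : acc.keys = keys := by
      simp [PySem.Dict.keys, hacc, Function.comp_def]
    have hstep : (pvStepA t acc it).items = keys.map (fun p => (p, pvLab t p (pr ++ [it]))) := by
      by_cases hc : (pvPairOf t it).1 = (pvPairOf t it).2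
      · rw [show pvStepA t acc it = acc from if_pos hc, hacc]
        exact List.map_congr_left fun p _ => by rw [pvLab_snoc_noncross t it p pr hc]
      · set p0 := pvPairOf t it with hp0def
        have hp0 : p0 ∈ keys := hk it (List.mem_cons_self ..) hc
        obtain ⟨ka, kb, hks, hka, hkb⟩ := pvSplitKeys keys p0 hnd hp0
        have hspA : acc.items
            = ka.map (fun p => (p, pvLab t p pr)) ++ (p0, pvLab t p0 pr)
              :: kb.map (fun p => (p, pvLab t p pr)) := by
          rw [hacc, hks]; simp
        have hxs : ∀ q ∈ ka.map (fun p => (p, pvLab t p pr)), q.1 ≠ p0 := by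
          intro q hq; obtain ⟨p, hp, rfl⟩ := List.mem_map.mp hq
          intro hcon; exact hka (hcon ▸ hp)
        have hys : ∀ q ∈ kb.map (fun p => (p, pvLab t p pr)), q.1 ≠ p0 := by
          intro q hq; obtain ⟨p, hp, rfl⟩ := List.mem_map.mp hq
          intro hcon; exact hkb (hcon ▸ hp)
        have hga : acc.get? p0 = some (pvLab t p0 pr) := by
          refine PySem.Dict.get?_of_mem_items _ ?_ (by rw [hkeysD]; exact hnd)
          rw [hspA]; simp
        have hmaps : ∀ (w : Option String), pvLab t p0 (pr ++ [it]) = w →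
            ka.map (fun p => (p, pvLab t p pr)) ++ (p0, w)
              :: kb.map (fun p => (p, pvLab t p pr))
            = keys.map (fun p => (p, pvLab t p (pr ++ [it]))) := by
          intro w hw
          rw [hks]
          simp only [List.map_append, List.map_cons, ← hw]
          congr 1
          · refine (List.map_congr_left fun p hp => ?_).symm
            rw [pvLab_snoc_ne t it p pr (by intro hcon; apply hka; rw [hp0def, hcon]; exact hp)]
          · congr 1
            refine (List.map_congr_left fun p hp => ?_).symm
            rw [pvLab_snoc_ne t it p pr (by intro hcon; apply hkb; rw [hp0def, hcon]; exact hp)]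
        by_cases h2 : it.2 = some "-->"
        · rw [show pvStepA t acc it = acc.insert p0 (some "-->") from by
            unfold pvStepA; rw [if_neg hc, if_pos h2]]
          rw [pvInsert_mid acc p0 (some "-->") _ _ _ hspA hxs hys]
          refine hmaps (some "-->") ?_
          rw [pvLab, pvHasArrow_snoc]
          simp [pvCrossB, hc, h2, ← hp0def]
        · by_cases h3 : it.2 = some "<->"
          · by_cases hA : pvHasArrow t p0 pr
            · have hcur : pvLab t p0 pr = some "-->" := by rw [pvLab, if_pos hA]
              rw [show pvStepA t acc it = acc from by
                unfold pvStepA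
                rw [if_neg hc, if_neg h2, if_neg (by
                  simp only [hga, ← hp0def, not_and, ne_eq, not_not]
                  intro _; rw [hcur])]]
              rw [hacc]
              refine List.map_congr_left fun p hp => ?_
              by_cases hpe : p0 = p
              · subst hpe
                have hnew : pvLab t p0 (pr ++ [it]) = some "-->" := by
                  rw [pvLab, pvHasArrow_snoc, hA]
                  simp
                rw [hnew, hcur]
              · rw [pvLab_snoc_ne t it p pr (fun hcon => hpe (hp0def.trans hcon))]
            · have hAfalse : pvHasArrow t p0 pr = false := by
                simpa using hA
              have hcur : acc.get? p0 ≠ some (some "-->") := by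
                rw [hga]
                intro hEq
                rw [Option.some_inj, pvLab, hAfalse] at hEq
                simp only [Bool.false_eq_true, if_false] at hEq
                split at hEq <;> simp_all
              rw [show pvStepA t acc it = acc.insert p0 (some "<->") from by
                unfold pvStepA; rw [if_neg hc, if_neg h2, if_pos ⟨h3, hcur⟩]]
              rw [pvInsert_mid acc p0 (some "<->") _ _ _ hspA hxs hys]
              refine hmaps (some "<->") ?_
              have hAn : pvHasArrow t p0 (pr ++ [it]) = false := by
                rw [pvHasArrow_snoc, hAfalse]
                simp [h2]
              rw [pvLab, hAn]
              simp only [Bool.false_eq_true, if_false]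
              rw [pvHasBi_snoc]
              simp [pvCrossB, hc, h3, ← hp0def]
          · rw [show pvStepA t acc it = acc from by
              unfold pvStepA; rw [if_neg hc, if_neg h2, if_neg (fun h => h3 h.1)]]
            rw [hacc]
            exact List.map_congr_left fun p _ => by rw [pvLab_snoc_other t it p pr h2 h3]
    rw [List.foldl_cons,
        ih (pr ++ [it]) (pvStepA t acc it) hstep
          (fun it' hit' => hk it' (List.mem_cons_of_mem _ hit'))]
    simp

-- B's dict comprehension: folding insert with a key-determined value
theorem pvB_items (g : (Int × Int) → Option String) (ps ks : List (Int × Int))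
    (acc : PySem.Dict (Int × Int) (Option String))
    (hnd : ks.Nodup) (hacc : acc.items = ks.map (fun p => (p, g p))) :
    (ps.foldl (fun a p => a.insert p (g p)) acc).items
      = (ks ++ pvFreshP ps ks).map (fun p => (p, g p)) := by
  induction ps generalizing ks acc with
  | nil => simpa [pvFreshP] using hacc
  | cons p ps ih =>
    have hkeysD : acc.keys = ks := by simp [PySem.Dict.keys, hacc, Function.comp_def]
    simp only [List.foldl_cons, pvFreshP]
    by_cases hm : p ∈ ks
    · rw [if_neg (by simp [hm])]
      obtain ⟨ka, kb, hks, hka, hkb⟩ := pvSplitKeys ks p hnd hm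
      have hspA : acc.items = ka.map (fun q => (q, g q)) ++ (p, g p) :: kb.map (fun q => (q, g q)) := by
        rw [hacc, hks]; simp
      have heq : acc.insert p (g p) = acc := by
        apply PySem.Dict.ext
        rw [pvInsert_mid acc p (g p) (g p) _ _ hspA
          (by intro q hq; obtain ⟨r, hr, rfl⟩ := List.mem_map.mp hq; exact fun hcon => hka (hcon ▸ hr))
          (by intro q hq; obtain ⟨r, hr, rfl⟩ := List.mem_map.mp hq; exact fun hcon => hkb (hcon ▸ hr)),
          hspA]
      rw [heq, ih ks acc hnd hacc]
    · rw [if_pos hm]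
      have hit : (acc.insert p (g p)).items = acc.items ++ [(p, g p)] :=
        pvInsert_append acc p (g p) (by rw [hkeysD]; exact hm)
      have hacc' : (acc.insert p (g p)).items = (ks ++ [p]).map (fun q => (q, g q)) := by
        rw [hit, hacc]; simp
      have hnd' : (ks ++ [p]).Nodup :=
        List.Nodup.append hnd (List.nodup_singleton _)
          (by intro x hx hx'; simp at hx'; exact hm (hx' ▸ hx))
      rw [ih (ks ++ [p]) _ hnd' hacc',
          pvFreshP_congr ps (ks ++ [p]) (p :: ks) (fun x => by simp [or_comm])]
      simp

-- B's membership tests compute pvHasArrow / pvHasBi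
theorem pvContains_arrow (t : Int) (l : List ((Int × Int) × Option String)) (p : Int × Int) :
    PySem.Set.contains (pvArrowSet t l) p = pvHasArrow t p l := by
  rw [Bool.eq_iff_iff, PySem.Set.contains_iff]
  unfold pvArrowSet pvHasArrow
  rw [PySem.Set.mem_ofList]
  simp only [List.mem_map, List.mem_filter, List.any_eq_true, Bool.and_eq_true,
    beq_iff_eq, decide_eq_true_eq]
  constructor
  · rintro ⟨it, ⟨hit, h1, h2⟩, h3⟩; exact ⟨it, hit, ⟨h2, h1⟩, h3⟩
  · rintro ⟨it, hit, ⟨h2, h1⟩, h3⟩; exact ⟨it, ⟨hit, h1, h2⟩, h3⟩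

theorem pvContains_bi (t : Int) (l : List ((Int × Int) × Option String)) (p : Int × Int) :
    PySem.Set.contains (pvBiSet t l) p = pvHasBi t p l := by
  rw [Bool.eq_iff_iff, PySem.Set.contains_iff]
  unfold pvBiSet pvHasBi
  rw [PySem.Set.mem_ofList]
  simp only [List.mem_map, List.mem_filter, List.any_eq_true, Bool.and_eq_true,
    beq_iff_eq, decide_eq_true_eq]
  constructor
  · rintro ⟨it, ⟨hit, h1, h2⟩, h3⟩; exact ⟨it, hit, ⟨h2, h1⟩, h3⟩
  · rintro ⟨it, hit, ⟨h2, h1⟩, h3⟩; exact ⟨it, ⟨hit, h1, h2⟩, h3⟩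

theorem pvClassify_eq (t : Int) (l : List ((Int × Int) × Option String)) (p : Int × Int) :
    pvClassify (pvArrowSet t l) (pvBiSet t l) p = pvLab t p l := by
  unfold pvClassify pvLab
  rw [pvContains_arrow, pvContains_bi]

-- the two ports agree on every input
theorem pvPorts_eq (mag : List (Int × Int × Option String)) (n : Int) :
    get_MAG_summary mag n = get_MAG_summary_alt mag n := by
  unfold get_MAG_summary get_MAG_summary_alt
  dsimp only
  set magD : PySem.Dict (Int × Int) (Option String) :=
    PySem.Dict.ofList (mag.map (fun e => ((e.1, e.2.1), e.2.2))) with hmagD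
  have hndk : magD.keys.Nodup := PySem.Dict.nodup_keys_ofList _
  have hcongr : List.foldl (pvStepAraw n magD) (List.foldl (pvStep0 n) PySem.Dict.empty magD.items) magD.items
      = List.foldl (pvStepA n) (List.foldl (pvStep0 n) PySem.Dict.empty magD.items) magD.items := by
    refine PySem.List.foldl_congr_mem' _ _ _ _ (fun it hit acc => ?_)
    have hget : magD.get? it.1 = some it.2 :=
      PySem.Dict.get?_of_mem_items _ (show (it.1, it.2) ∈ magD.items from hit) hndk
    simp only [pvStepAraw, pvStepA, hget, Option.some.injEq]
  have hie : (PySem.Dict.empty : PySem.Dict (Int × Int) (Option String)).items = [] := rfl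
  have hke : (PySem.Dict.empty : PySem.Dict (Int × Int) (Option String)).keys = [] := rfl
  have hkeys0 := pvFresh_nodup_notmem n magD.items []
  have hinit : (List.foldl (pvStep0 n) PySem.Dict.empty magD.items).items
      = (pvFresh n magD.items []).map (fun k => (k, (none : Option String))) := by
    have h := pvInit_items n magD.items PySem.Dict.empty
      (by rw [hke]; exact List.nodup_nil) (by rw [hie]; intro q hq; cases hq)
    rw [hie, hke] at h
    simpa using h
  have hA : (List.foldl (pvStepA n) (List.foldl (pvStep0 n) PySem.Dict.empty magD.items) magD.items).items
      = (pvFresh n magD.items []).map (fun p => (p, pvLab n p magD.items)) := by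
    have h := pvA_items n magD.items [] (pvFresh n magD.items [])
      (List.foldl (pvStep0 n) PySem.Dict.empty magD.items)
      hkeys0.1
      (by rw [hinit]
          refine List.map_congr_left fun p _ => ?_
          simp [pvLab, pvHasArrow, pvHasBi])
      (fun it hit hcross => by
        rcases pvFresh_mem n magD.items [] it hit hcross with h | h
        · cases h
        · exact h)
    simpa using h
  have hB : (((magD.items.filter (pvCrossB n)).map (pvPairOf n)).foldl
        (fun acc p => acc.insert p (pvClassify (pvArrowSet n magD.items) (pvBiSet n magD.items) p))
        PySem.Dict.empty).items
      = (pvFresh n magD.items []).map (fun p => (p, pvLab n p magD.items)) := by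
    have h := pvB_items (pvClassify (pvArrowSet n magD.items) (pvBiSet n magD.items))
      ((magD.items.filter (pvCrossB n)).map (pvPairOf n)) [] PySem.Dict.empty
      List.nodup_nil (by rw [hie]; simp)
    rw [h, pvFreshP_eq_pvFresh]
    simp only [List.nil_append]
    exact List.map_congr_left fun p _ => by rw [pvClassify_eq]
  rw [hcongr, hA, hB]

-- ===== VERDICT (by name: the statement is the Claim_ definition above) =====
theorem get_MAG_summary_spec : Claim_equal_get_MAG_summary := by
  intro mag n_timelags _ _
  unfold Spec_get_MAG_summary
  exact pvPorts_eq mag n_timelags
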